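-- pv_equiv track=rewrite | github.com/Tigran0000/textai | receipt_handler.py | _analyze_receipt_columns
-- ===== SOURCE A (Python) =====
-- from typing import Dict, List, Optional, Tuple, Any
--
-- def _analyze_receipt_columns(lines: Dict) -> List[int]:
--     """Analyze receipt structure to determine column positions"""
--
--     # Collect all left positions
--     all_positions = []
--     for line_key, line in lines.items():
--         all_positions.extend(line['left_positions'])
--
--     # If no positions found, return empty list
--     if not all_positions:
--         return []
--
--     # Create position histogram
--     position_counts = {}
--     for pos in all_positions:
--         # Group positions within 10 pixels
--         pos_key = pos // 10 * 10
--         position_counts[pos_key] = position_counts.get(pos_key, 0) + 1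
--
--     # Find position clusters (peaks in the histogram)
--     min_count = max(3, len(lines) // 4)  # Minimum frequency to be considered a column
--     column_positions = [pos for pos, count in position_counts.items() if count >= min_count]
--
--     # Sort positions from left to right
--     column_positions.sort()
--
--     return column_positions
-- ===== SOURCE B (Python) =====
-- def _analyze_receipt_columns(lines):
--     """Analyze receipt structure to determine column positions"""
--     # Different algorithm: no histogram dict. Sort the positions once, then one
--     # linear sweep over the sorted list counting each contiguous 10px-bucket run;
--     # qualifying bucket keys come out already in ascending order.
--     positions = [p for line in lines.values() for p in line['left_positions']]
--     if not positions:
--         return []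
--     min_count = max(3, len(lines) // 4)
--     positions.sort()
--     result = []
--     cur = None
--     cnt = 0
--     for p in positions:
--         k = p // 10 * 10
--         if k == cur:
--             cnt += 1
--         else:
--             if cur is not None and cnt >= min_count:
--                 result.append(cur)
--             cur, cnt = k, 1
--     if cnt >= min_count:
--         result.append(cur)
--     return result
-- ===== Notes on version B (the rewrite author's own statement) =====
-- stated objective: alternative
-- what changed: Replaces the dict histogram + items filter + final sort with sort-then-sweep: sort the flattened positions once and count each contiguous 10px-bucket run in a single linear pass, emitting qualifying bucket keys already in ascending order.
import Mathlib
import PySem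

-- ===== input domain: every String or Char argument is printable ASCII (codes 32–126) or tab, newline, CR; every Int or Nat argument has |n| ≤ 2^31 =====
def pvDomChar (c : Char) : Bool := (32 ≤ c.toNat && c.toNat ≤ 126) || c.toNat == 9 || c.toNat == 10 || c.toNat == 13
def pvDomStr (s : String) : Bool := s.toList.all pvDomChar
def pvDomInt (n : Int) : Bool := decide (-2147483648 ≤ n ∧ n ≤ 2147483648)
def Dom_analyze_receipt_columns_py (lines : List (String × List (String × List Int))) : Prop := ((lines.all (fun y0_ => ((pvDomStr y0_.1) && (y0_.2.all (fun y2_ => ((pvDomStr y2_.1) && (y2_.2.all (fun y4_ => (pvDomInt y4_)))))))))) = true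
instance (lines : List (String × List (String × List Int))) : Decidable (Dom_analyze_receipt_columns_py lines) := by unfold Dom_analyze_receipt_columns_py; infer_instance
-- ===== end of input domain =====

-- B replaces A's dict histogram (+ items filter + final sort) by sorting the flattened
-- positions once and counting each contiguous 10px-bucket run in a single linear sweep
-- (alternative algorithm, similar cost).

-- ===== PORT A =====
def analyze_receipt_columns_py (lines : List (String × List (String × List Int))) : List Int :=
  let d := PySem.Dict.ofList lines
  -- for line_key, line in lines.items(): all_positions.extend(line['left_positions'])
  -- (the lookup raises KeyError when 'left_positions' is absent: excluded by Pre_; getD [] totalizes)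
  let all_positions := d.items.foldl
    (fun acc kv => acc ++ (((PySem.Dict.ofList kv.2).get? "left_positions").getD [])) ([] : List Int)
  if all_positions = [] then []
  else
    let position_counts := all_positions.foldl
      (fun pc pos => pc.insert (PySem.Int.floordiv pos 10 * 10)
        (pc.getD (PySem.Int.floordiv pos 10 * 10) 0 + 1)) (PySem.Dict.empty : PySem.Dict Int Int)
    let min_count : Int := max 3 (PySem.Int.floordiv (Int.ofNat d.size) 4)
    let column_positions :=
      (position_counts.items.filter (fun pc => decide (min_count ≤ pc.2))).map (fun pc => pc.1)
    PySem.List.sorted column_positions (fun x => x) false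

-- ===== PORT B =====
def analyze_receipt_columns_py_alt (lines : List (String × List (String × List Int))) : List Int :=
  let d := PySem.Dict.ofList lines
  let positions := d.values.flatMap
    (fun line => (((PySem.Dict.ofList line).get? "left_positions").getD []))
  if positions = [] then []
  else
    let min_count : Int := max 3 (PySem.Int.floordiv (Int.ofNat d.size) 4)
    let sortedP := PySem.List.sorted positions (fun x => x) false
    -- for p in sorted positions: bucket and count the current run, emitting finished runs
    let st := sortedP.foldl
      (fun st p =>
        let k := PySem.Int.floordiv p 10 * 10
        if some k = st.2.1 then (st.1, st.2.1, st.2.2 + 1)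
        else ((if st.2.1 ≠ none ∧ min_count ≤ st.2.2 then st.1 ++ st.2.1.toList else st.1),
              some k, (1 : Int)))
      (([] : List Int), (none : Option Int), (0 : Int))
    -- final run: Python's 'if cnt >= min_count: result.append(cur)' (cur is set here since positions ≠ [])
    if min_count ≤ st.2.2 then st.1 ++ st.2.1.toList else st.1

-- ===== PRECONDITION & SPEC =====
-- Pre_ excludes exactly the inputs on which the Python A raises KeyError: a line dict
-- (after Python dict construction from the pairs) lacking the key 'left_positions'.
def Pre_analyze_receipt_columns_py (lines : List (String × List (String × List Int))) : Prop :=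
  ∀ kv ∈ (PySem.Dict.ofList lines).items, (PySem.Dict.ofList kv.2).contains "left_positions" = true
instance (lines : List (String × List (String × List Int))) : Decidable (Pre_analyze_receipt_columns_py lines) := by unfold Pre_analyze_receipt_columns_py; infer_instance

def pvWitness_analyze_receipt_columns_py : (List (String × List (String × List Int))) :=
  [("a", [("left_positions", [11, 14, 17, 40])]), ("b", [("left_positions", [12])])]

def Spec_analyze_receipt_columns_py (lines : List (String × List (String × List Int))) (out : List Int) : Prop := out = analyze_receipt_columns_py_alt lines
instance (lines : List (String × List (String × List Int))) (out : List Int) : Decidable (Spec_analyze_receipt_columns_py lines out) := by unfold Spec_analyze_receipt_columns_py; infer_instance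

-- ===== CLAIM (what is proved, stated in full; the proofs are below) =====
def Claim_equal_analyze_receipt_columns_py : Prop := ∀ (lines : List (String × List (String × List Int))), Dom_analyze_receipt_columns_py lines → Pre_analyze_receipt_columns_py lines → Spec_analyze_receipt_columns_py lines (analyze_receipt_columns_py lines)

-- ===== LEMMAS AND PROOFS =====

-- the 10px bucket of a position
def pvBucket (p : Int) : Int := PySem.Int.floordiv p 10 * 10

-- one step of B's sweep (k already bucketed)
def pvStep (m : Int) (st : List Int × Option Int × Int) (k : Int) : List Int × Option Int × Int :=
  if some k = st.2.1 then (st.1, st.2.1, st.2.2 + 1)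
  else ((if st.2.1 ≠ none ∧ m ≤ st.2.2 then st.1 ++ st.2.1.toList else st.1), some k, (1 : Int))

-- B's finalization after the loop
def pvFin (m : Int) (st : List Int × Option Int × Int) : List Int :=
  if m ≤ st.2.2 then st.1 ++ st.2.1.toList else st.1

-- functional description of the sweep once the first element has been consumed
def pvRuns (m a cnt : Int) : List Int → List Int
  | [] => if m ≤ cnt then [a] else []
  | k :: t => if k = a then pvRuns m a (cnt + 1) t
              else (if m ≤ cnt then [a] else []) ++ pvRuns m k 1 t

theorem pv_bucket_mono (p q : Int) (h : p ≤ q) : pvBucket p ≤ pvBucket q := by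
  unfold pvBucket
  rw [PySem.Int.floordiv_eq_ediv_of_pos (by norm_num), PySem.Int.floordiv_eq_ediv_of_pos (by norm_num)]
  have := Int.ediv_le_ediv (by norm_num : (0:Int) < 10) h
  omega

theorem pv_map_sorted (P : List Int) :
    (PySem.List.sorted P (fun x => x) false).map pvBucket
      = PySem.List.sorted (P.map pvBucket) (fun x => x) false := by
  symm
  apply PySem.List.sorted_id_eq_of_perm_of_pairwise
  · exact (PySem.List.sorted_perm P (fun x => x) false).map pvBucket
  · exact List.Pairwise.map pvBucket (fun a b h => pv_bucket_mono a b h)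
      (PySem.List.sorted_pairwise P (fun x => x))

theorem pv_ofList_pairwise_le (S : List Int) (h : S.Pairwise (· ≤ ·)) :
    (PySem.Set.ofList S).Pairwise (· ≤ ·) := by
  induction S with
  | nil => simp [PySem.Set.ofList_nil]
  | cons x t ih =>
    rcases List.pairwise_cons.1 h with ⟨hx, ht⟩
    rw [PySem.Set.ofList_cons]
    refine List.pairwise_cons.2 ⟨?_, ?_⟩
    · intro y hy
      have : y ∈ PySem.Set.ofList t := List.mem_of_mem_filter hy
      exact hx y ((PySem.Set.mem_ofList t y).1 this)
    · exact List.Pairwise.sublist (List.filter_sublist) (ih ht)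

theorem pv_ofList_pairwise_lt (S : List Int) (h : S.Pairwise (· ≤ ·)) :
    (PySem.Set.ofList S).Pairwise (· < ·) := by
  have h1 := pv_ofList_pairwise_le S h
  have h2 : (PySem.Set.ofList S).Pairwise (· ≠ ·) := PySem.Set.nodup_ofList S
  exact (h1.and h2).imp (fun hab => lt_of_le_of_ne hab.1 hab.2)

theorem pv_sorted_ofList (keys : List Int) :
    PySem.List.sorted (PySem.Set.ofList keys) (fun x => x) false
      = PySem.Set.ofList (PySem.List.sorted keys (fun x => x) false) := by
  apply PySem.List.sorted_eq_of_perm_of_pairwise_lt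
  · refine (List.perm_ext_iff_of_nodup (PySem.Set.nodup_ofList _) (PySem.Set.nodup_ofList _)).2 ?_
    intro a
    rw [PySem.Set.mem_ofList, PySem.Set.mem_ofList]
    exact (PySem.List.sorted_perm keys (fun x => x) false).mem_iff
  · exact pv_ofList_pairwise_lt _ (PySem.List.sorted_pairwise keys (fun x => x))

theorem pv_ofList_cons_self (a : Int) (u : List Int) :
    PySem.Set.ofList (a :: a :: u) = PySem.Set.ofList (a :: u) := by
  simp [PySem.Set.ofList_cons, PySem.Set.discard, List.filter_filter]

theorem pv_ofList_cons_of_not_mem (a : Int) (u : List Int) (h : a ∉ u) :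
    PySem.Set.ofList (a :: u) = a :: PySem.Set.ofList u := by
  rw [PySem.Set.ofList_cons]
  congr 1
  unfold PySem.Set.discard
  refine List.filter_eq_self.2 ?_
  intro y hy
  have hyu : y ∈ u := (PySem.Set.mem_ofList u y).1 hy
  have hne : y ≠ a := fun hya => h (hya ▸ hyu)
  simp [hne]

theorem pv_foldl_runs (m : Int) (t : List Int) : ∀ (a cnt : Int) (res : List Int),
    pvFin m (t.foldl (pvStep m) (res, some a, cnt)) = res ++ pvRuns m a cnt t := by
  induction t with
  | nil =>
    intro a cnt res
    simp only [List.foldl_nil, pvFin, pvRuns]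
    split_ifs <;> simp
  | cons k u ih =>
    intro a cnt res
    by_cases h : k = a
    · subst h
      simp only [List.foldl_cons, pvStep, pvRuns]
      exact ih k (cnt + 1) res
    · have hne : ¬ (some k = some a) := by simpa using h
      simp only [List.foldl_cons, pvStep, if_neg hne, pvRuns, if_neg h]
      rw [ih k 1 _]
      simp only [ne_eq, reduceCtorEq, not_false_eq_true, true_and, Option.toList_some]
      split_ifs <;> simp

theorem pv_runs_filter (m : Int) : ∀ (t : List Int) (a cnt : Int),
    (∀ x ∈ t, a ≤ x) → t.Pairwise (· ≤ ·) →
    pvRuns m a cnt t = (PySem.Set.ofList (a :: t)).filter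
      (fun k => decide (m ≤ (((a :: t).count k : Int)) + (if k = a then cnt - 1 else 0))) := by
  intro t
  induction t with
  | nil =>
    intro a cnt _ _
    have h : PySem.Set.ofList [a] = [a] := rfl
    simp only [pvRuns, h, List.filter_cons, List.filter_nil, List.count_cons_self, List.count_nil]
    by_cases hm : m ≤ cnt <;> simp [hm]
  | cons k u ih =>
    intro a cnt hch hp
    rcases List.pairwise_cons.1 hp with ⟨hk, hu⟩
    by_cases hka : k = a
    · subst hka
      simp only [pvRuns, reduceIte]
      rw [ih k (cnt + 1) (fun x hx => hch x (List.mem_cons_of_mem _ hx)) hu]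
      rw [pv_ofList_cons_self]
      refine List.filter_congr ?_
      intro j _
      simp only [List.count_cons, beq_iff_eq, decide_eq_decide]
      push_cast
      split_ifs <;> omega
    · have hak : a ≤ k := hch k List.mem_cons_self
      have hlt : a < k := lt_of_le_of_ne hak (Ne.symm hka)
      have hnm : a ∉ k :: u := by
        intro hmem
        rcases List.mem_cons.1 hmem with h | h
        · exact hka h.symm
        · exact absurd (hk a h) (by omega)
      simp only [pvRuns, if_neg hka]
      rw [ih k 1 hk hu]
      rw [pv_ofList_cons_of_not_mem a (k :: u) hnm]
      rw [List.filter_cons]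
      have hc0 : (k :: u).count a = 0 := List.count_eq_zero.2 hnm
      have hpa : (decide (m ≤ (((a :: k :: u).count a : Int)) + (if a = a then cnt - 1 else 0))) = decide (m ≤ cnt) := by
        simp only [reduceIte, List.count_cons_self, hc0, decide_eq_decide]
        push_cast
        omega
      rw [hpa]
      have hrest : (PySem.Set.ofList (k :: u)).filter
            (fun j => decide (m ≤ (((a :: k :: u).count j : Int)) + (if j = a then cnt - 1 else 0)))
          = (PySem.Set.ofList (k :: u)).filter
            (fun j => decide (m ≤ (((k :: u).count j : Int)) + (if j = k then (1:Int) - 1 else 0))) := by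
        refine List.filter_congr ?_
        intro j hj
        have hjmem : j ∈ k :: u := (PySem.Set.mem_ofList _ j).1 hj
        have hja : j ≠ a := by rintro rfl; exact hnm hjmem
        simp only [List.count_cons, beq_iff_eq, decide_eq_decide]
        push_cast
        split_ifs <;> omega
      rw [hrest]
      by_cases hm : m ≤ cnt <;> simp [hm]

theorem pv_runs_main (m : Int) (keys : List Int) (hne : keys ≠ []) :
    pvFin m ((PySem.List.sorted keys (fun x => x) false).foldl (pvStep m)
        (([] : List Int), (none : Option Int), (0 : Int)))
      = (PySem.List.sorted (PySem.Set.ofList keys) (fun x => x) false).filter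
          (fun k => decide (m ≤ (keys.count k : Int))) := by
  have hS : PySem.List.sorted keys (fun x => x) false ≠ [] := by
    rw [Ne, PySem.List.sorted_eq_nil_iff]; exact hne
  obtain ⟨a, t, hat⟩ := List.exists_cons_of_ne_nil hS
  have hpair : (PySem.List.sorted keys (fun x => x) false).Pairwise (· ≤ ·) :=
    PySem.List.sorted_pairwise keys (fun x => x)
  rw [hat] at hpair ⊢
  rcases List.pairwise_cons.1 hpair with ⟨ha, ht⟩
  have hstep1 : pvStep m (([] : List Int), (none : Option Int), (0 : Int)) a
      = (([] : List Int), some a, (1 : Int)) := by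
    simp [pvStep]
  rw [List.foldl_cons, hstep1, pv_foldl_runs m t a 1 []]
  rw [pv_runs_filter m t a 1 ha ht]
  rw [pv_sorted_ofList, hat]
  refine (List.nil_append _).symm ▸ ?_
  refine List.filter_congr ?_
  intro j hj
  have hcount : (a :: t).count j = keys.count j := by
    have := (PySem.List.sorted_perm keys (fun x => x) false)
    rw [hat] at this
    exact this.count_eq j
  rw [← hcount]
  simp only [decide_eq_decide]
  split_ifs <;> omega

-- A-side: the histogram loop is Counter(map bucket positions)
theorem hist_eq_counter (P : List Int) :
    P.foldl (fun pc pos => pc.insert (pvBucket pos) (pc.getD (pvBucket pos) 0 + 1))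
        (PySem.Dict.empty : PySem.Dict Int Int)
      = PySem.Dict.counter (P.map pvBucket) := by
  rw [← PySem.Dict.foldl_insert_getD_add_one_eq_counter, List.foldl_map]

theorem counter_filter_map (keys : List Int) (m : Int) :
    ((PySem.Dict.counter keys).items.filter (fun pc => decide (m ≤ pc.2))).map (fun pc => pc.1)
      = (PySem.Set.ofList keys).filter (fun k => decide (m ≤ (keys.count k : Int))) := by
  rw [PySem.Dict.items_counter, List.filter_map, List.map_map]
  simp [Function.comp_def]

theorem sorted_filter_comm (keys : List Int) (q : Int → Bool) :
    PySem.List.sorted ((PySem.Set.ofList keys).filter q) (fun x => x) false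
      = (PySem.List.sorted (PySem.Set.ofList keys) (fun x => x) false).filter q := by
  apply PySem.List.sorted_eq_of_perm_of_pairwise_lt
  · exact (PySem.List.sorted_perm _ _ _).filter q
  · exact (PySem.List.sorted_ofList_pairwise_lt keys).filter q

-- B-side core: the sweep over the sorted positions equals the sorted filtered bucket set
theorem pv_B_core (m : Int) (P : List Int) (hne : P ≠ []) :
    pvFin m ((PySem.List.sorted P (fun x => x) false).foldl
        (fun st p => pvStep m st (pvBucket p))
        (([] : List Int), (none : Option Int), (0 : Int)))
      = (PySem.List.sorted (PySem.Set.ofList (P.map pvBucket)) (fun x => x) false).filter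
          (fun k => decide (m ≤ ((P.map pvBucket).count k : Int))) := by
  have hfold : (PySem.List.sorted P (fun x => x) false).foldl
        (fun st p => pvStep m st (pvBucket p))
        (([] : List Int), (none : Option Int), (0 : Int))
      = ((PySem.List.sorted P (fun x => x) false).map pvBucket).foldl (pvStep m)
        (([] : List Int), (none : Option Int), (0 : Int)) := by
    rw [List.foldl_map]
  rw [hfold, pv_map_sorted]
  exact pv_runs_main m (P.map pvBucket) (by simpa using hne)

theorem analyze_equiv (lines : List (String × List (String × List Int))) :
    analyze_receipt_columns_py lines = analyze_receipt_columns_py_alt lines := by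
  simp only [analyze_receipt_columns_py, analyze_receipt_columns_py_alt, PySem.Dict.values]
  rw [PySem.List.foldl_append_eq_flatMap]
  simp only [List.nil_append, List.flatMap_map]
  by_cases h : ((PySem.Dict.ofList lines).items).flatMap
      (fun kv => (((PySem.Dict.ofList kv.2).get? "left_positions").getD [])) = []
  · simp [h]
  · rw [if_neg h, if_neg h]
    rw [show (fun (pc : PySem.Dict Int Int) (pos : Int) =>
          pc.insert (PySem.Int.floordiv pos 10 * 10) (pc.getD (PySem.Int.floordiv pos 10 * 10) 0 + 1))
        = (fun pc pos => pc.insert (pvBucket pos) (pc.getD (pvBucket pos) 0 + 1)) from rfl]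
    rw [hist_eq_counter, counter_filter_map, sorted_filter_comm]
    exact (pv_B_core (max 3 (PySem.Int.floordiv (Int.ofNat (PySem.Dict.ofList lines).size) 4)) _ h).symm

-- ===== VERDICT (by name: the statement is the Claim_ definition above) =====
theorem analyze_receipt_columns_py_spec : Claim_equal_analyze_receipt_columns_py := by
  intro lines _ _
  exact analyze_equiv lines
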